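-- pv_equiv track=rewrite | github.com/sohv/scorj | utils/scoring_engine_openai.py | _get_highest_degree
-- ===== SOURCE A (Python) =====
-- from typing import Dict, Any, Tuple, List
--
-- def _get_highest_degree(education: List[Dict]) -> str:
--     """Get the highest degree from education list."""
--     degree_hierarchy = {
--         'phd': 5, 'doctorate': 5, 'doctoral': 5,
--         'master': 4, 'masters': 4, 'mba': 4, 'ms': 4, 'ma': 4,
--         'bachelor': 3, 'bachelors': 3, 'bs': 3, 'ba': 3, 'be': 3,
--         'associate': 2, 'associates': 2,
--         'diploma': 1, 'certificate': 1
--     }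
--
--     highest_level = 0
--     highest_degree = 'No degree specified'
--
--     for edu in education:
--         degree = edu.get('degree', '').lower()
--         for degree_type, level in degree_hierarchy.items():
--             if degree_type in degree and level > highest_level:
--                 highest_level = level
--                 highest_degree = edu.get('degree', degree_type)
--
--     return highest_degree
-- ===== SOURCE B (Python) =====
-- def _get_highest_degree(education):
--     """Get the highest degree from education list (level-major scan, early return)."""
--     tiers = [
--         ['phd', 'doctorate', 'doctoral'],
--         ['master', 'masters', 'mba', 'ms', 'ma'],
--         ['bachelor', 'bachelors', 'bs', 'ba', 'be'],
--         ['associate', 'associates'],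
--         ['diploma', 'certificate'],
--     ]
--     for keywords in tiers:
--         for edu in education:
--             degree = edu.get('degree', '')
--             if any(k in degree.lower() for k in keywords):
--                 return degree
--     return 'No degree specified'
-- ===== Notes on version B (the rewrite author's own statement) =====
-- stated objective: alternative
-- what changed: Replaces the accumulator-based scan (tracking highest level and degree across a nested loop over the keyword dictionary) with a level-major search: tiers are scanned from highest to lowest and the first education entry matching the current tier is returned immediately.
import Mathlib
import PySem

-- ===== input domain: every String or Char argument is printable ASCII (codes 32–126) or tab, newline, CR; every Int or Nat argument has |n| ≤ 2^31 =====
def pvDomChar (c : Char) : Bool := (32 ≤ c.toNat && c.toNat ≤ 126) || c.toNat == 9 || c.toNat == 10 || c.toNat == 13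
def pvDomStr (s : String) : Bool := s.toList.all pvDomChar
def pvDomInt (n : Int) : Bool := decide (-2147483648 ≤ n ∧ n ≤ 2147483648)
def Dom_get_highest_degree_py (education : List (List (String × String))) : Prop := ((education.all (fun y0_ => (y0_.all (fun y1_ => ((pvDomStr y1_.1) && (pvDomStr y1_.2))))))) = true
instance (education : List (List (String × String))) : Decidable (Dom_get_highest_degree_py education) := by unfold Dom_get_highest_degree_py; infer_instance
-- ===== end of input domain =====

-- B replaces A's accumulator scan by a level-major search (highest tier first, first match returned); same cost, different traversal.

-- ===== PORT A =====
def hierA : List (String × Int) :=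
  [("phd", 5), ("doctorate", 5), ("doctoral", 5),
   ("master", 4), ("masters", 4), ("mba", 4), ("ms", 4), ("ma", 4),
   ("bachelor", 3), ("bachelors", 3), ("bs", 3), ("ba", 3), ("be", 3),
   ("associate", 2), ("associates", 2),
   ("diploma", 1), ("certificate", 1)]

def get_highest_degree_py (education : List (List (String × String))) : String :=
  (education.foldl
    (fun (st : Int × String) edu =>
      let degree := PySem.Str.lower (PySem.Dict.getD (PySem.Dict.mk edu) "degree" "")
      hierA.foldl
        (fun (st2 : Int × String) p =>
          if PySem.Str.isIn p.1 degree && decide (p.2 > st2.1) then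
            (p.2, PySem.Dict.getD (PySem.Dict.mk edu) "degree" p.1)
          else st2) st)
    (0, "No degree specified")).2

-- ===== PORT B =====
def bTiers : List (List String) :=
  [["phd", "doctorate", "doctoral"],
   ["master", "masters", "mba", "ms", "ma"],
   ["bachelor", "bachelors", "bs", "ba", "be"],
   ["associate", "associates"],
   ["diploma", "certificate"]]

def bMatches (kws : List String) (edu : List (String × String)) : Bool :=
  kws.any (fun k => PySem.Str.isIn k (PySem.Str.lower (PySem.Dict.getD (PySem.Dict.mk edu) "degree" "")))

def bGo (education : List (List (String × String))) : List (List String) → String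
  | [] => "No degree specified"
  | kws :: rest =>
    match education.find? (fun edu => bMatches kws edu) with
    | some edu => PySem.Dict.getD (PySem.Dict.mk edu) "degree" ""
    | none => bGo education rest

def get_highest_degree_py_alt (education : List (List (String × String))) : String :=
  bGo education bTiers

-- ===== PRECONDITION & SPEC =====
def Spec_get_highest_degree_py (education : List (List (String × String))) (out : String) : Prop := out = get_highest_degree_py_alt education
instance (education : List (List (String × String))) (out : String) : Decidable (Spec_get_highest_degree_py education out) := by unfold Spec_get_highest_degree_py; infer_instance

-- ===== CLAIM (what is proved, stated in full; the proofs are below) =====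
def Claim_equal_get_highest_degree_py : Prop := ∀ (education : List (List (String × String))), Dom_get_highest_degree_py education → Spec_get_highest_degree_py education (get_highest_degree_py education)


-- ===== LEMMAS AND PROOFS =====

-- common spec helpers
def pvDeg (edu : List (String × String)) : String :=
  PySem.Dict.getD (PySem.Dict.mk edu) "degree" ""

def pvLev (edu : List (String × String)) : Int :=
  if bMatches ["phd", "doctorate", "doctoral"] edu then 5
  else if bMatches ["master", "masters", "mba", "ms", "ma"] edu then 4
  else if bMatches ["bachelor", "bachelors", "bs", "ba", "be"] edu then 3
  else if bMatches ["associate", "associates"] edu then 2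
  else if bMatches ["diploma", "certificate"] edu then 1
  else 0

def pvM (xs : List (List (String × String))) (a : Int) : Int :=
  xs.foldl (fun acc e => max acc (pvLev e)) a

def pvStep (d : String) (st : Int × String) (p : String × Int) : Int × String :=
  if PySem.Str.isIn p.1 (PySem.Str.lower d) && decide (p.2 > st.1) then (p.2, d) else st

theorem pvLev_nonneg (edu : List (String × String)) : 0 ≤ pvLev edu := by
  unfold pvLev; split_ifs <;> omega

theorem pvLev_le5 (edu : List (String × String)) : pvLev edu ≤ 5 := by
  unfold pvLev; split_ifs <;> omega

theorem pvM_ge (xs : List (List (String × String))) (a : Int) : a ≤ pvM xs a := by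
  induction xs generalizing a with
  | nil => simp [pvM]
  | cons x xs ih =>
    have h := ih (max a (pvLev x))
    simp only [pvM, List.foldl_cons] at h ⊢
    omega

theorem pvM_exists (xs : List (List (String × String))) (a : Int) :
    pvM xs a = a ∨ ∃ e ∈ xs, pvLev e = pvM xs a := by
  induction xs generalizing a with
  | nil => left; simp [pvM]
  | cons x xs ih =>
    have hcons : pvM (x :: xs) a = pvM xs (max a (pvLev x)) := by simp [pvM]
    rcases ih (max a (pvLev x)) with h | ⟨e, he, hl⟩
    · by_cases hxa : pvLev x ≤ a
      · left; rw [hcons, h]; omega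
      · right; exact ⟨x, List.mem_cons_self .., by rw [hcons, h]; omega⟩
    · right; exact ⟨e, List.mem_cons_of_mem _ he, by rw [hcons]; exact hl⟩

theorem pvLev_le_pvM (xs : List (List (String × String))) (a : Int)
    (e : List (String × String)) (he : e ∈ xs) : pvLev e ≤ pvM xs a := by
  induction xs generalizing a with
  | nil => cases he
  | cons x xs ih =>
    rcases List.mem_cons.mp he with rfl | he'
    · calc pvLev e ≤ max a (pvLev e) := le_max_right _ _
        _ ≤ pvM xs (max a (pvLev e)) := pvM_ge _ _
        _ = pvM (e :: xs) a := by simp [pvM]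
    · have := ih (max a (pvLev x)) he'
      simpa [pvM] using this

theorem pvM_le5 (xs : List (List (String × String))) (a : Int) (ha : a ≤ 5) :
    pvM xs a ≤ 5 := by
  induction xs generalizing a with
  | nil => simpa [pvM]
  | cons x xs ih =>
    have h5 := pvLev_le5 x
    have := ih (max a (pvLev x)) (by omega)
    simpa [pvM] using this

-- one tier (all keywords with the same level) of A's inner loop
theorem pv_tier_fold (d : String) (l : Int) (kws : List String) (st : Int × String) :
    (kws.map (fun k => (k, l))).foldl (pvStep d) st =
      if kws.any (fun k => PySem.Str.isIn k (PySem.Str.lower d)) && decide (l > st.1) then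
        (l, d) else st := by
  induction kws generalizing st with
  | nil => simp
  | cons k ks ih =>
    simp only [List.map_cons, List.foldl_cons, List.any_cons, pvStep]
    by_cases h1 : PySem.Str.isIn k (PySem.Str.lower d) = true
    · by_cases h2 : l > st.1
      · simp only [h1, decide_eq_true h2]
        simp [ih]
      · simp only [h1, decide_eq_false h2]
        simp [ih, h2]
    · rw [Bool.not_eq_true] at h1
      simp only [h1]
      simp [ih]

theorem pv_hier_split :
    hierA = (["phd", "doctorate", "doctoral"].map (fun k => (k, (5 : Int))))
      ++ (["master", "masters", "mba", "ms", "ma"].map (fun k => (k, (4 : Int))))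
      ++ (["bachelor", "bachelors", "bs", "ba", "be"].map (fun k => (k, (3 : Int))))
      ++ (["associate", "associates"].map (fun k => (k, (2 : Int))))
      ++ (["diploma", "certificate"].map (fun k => (k, (1 : Int)))) := rfl

-- A's inner loop over the hierarchy = "update iff this entry beats the current level"

def pvCLev : List (Bool × Int) → Int
  | [] => 0
  | t :: r => if t.1 = true then t.2 else pvCLev r

theorem pvCLev_lt (ts : List (Bool × Int)) (c : Int) (hc : 0 < c)
    (h : ∀ p ∈ ts, p.2 < c) : pvCLev ts < c := by
  induction ts with
  | nil => simpa [pvCLev]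
  | cons t r ih =>
    simp only [pvCLev]
    split_ifs
    · exact h t (List.mem_cons_self ..)
    · exact ih (fun p hp => h p (List.mem_cons_of_mem _ hp))

-- the 5-step cascade of tier updates, for strictly descending positive levels
theorem pv_chain_fold (d : String) (ts : List (Bool × Int))
    (hsort : List.Pairwise (fun a b => b.2 < a.2) ts) (hpos : ∀ p ∈ ts, 0 < p.2) :
    ∀ (hl : Int) (hd : String), 0 ≤ hl →
    ts.foldl (fun (st : Int × String) t =>
        if t.1 && decide (t.2 > st.1) then (t.2, d) else st) (hl, hd)
    = if pvCLev ts > hl then (pvCLev ts, d) else (hl, hd) := by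
  induction ts with
  | nil =>
    intro hl hd h0
    rw [List.foldl_nil, if_neg (by simp [pvCLev]; omega)]
  | cons t rest ih =>
    intro hl hd h0
    have hpos' : ∀ p ∈ rest, 0 < p.2 := fun p hp => hpos p (List.mem_cons_of_mem _ hp)
    have hsort' : List.Pairwise (fun a b => b.2 < a.2) rest := (List.pairwise_cons.mp hsort).2
    have hlt : pvCLev rest < t.2 :=
      pvCLev_lt rest t.2 (hpos t (List.mem_cons_self ..)) (List.pairwise_cons.mp hsort).1
    rw [List.foldl_cons]
    by_cases hb : t.1 = true
    · by_cases hgt : t.2 > hl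
      · simp only [hb, decide_eq_true hgt, Bool.true_and, if_true]
        rw [ih hsort' hpos' t.2 d (by have := hpos t (List.mem_cons_self ..); omega)]
        rw [if_neg (by omega)]
        simp only [pvCLev, hb, if_true]
        rw [if_pos hgt]
      · simp only [hb, decide_eq_false hgt, Bool.and_false, Bool.false_eq_true, if_false]
        rw [ih hsort' hpos' hl hd h0]
        simp only [pvCLev, hb, if_true]
        rw [if_neg (by omega), if_neg hgt]
    · rw [Bool.not_eq_true] at hb
      simp only [hb, Bool.false_and, Bool.false_eq_true, if_false]
      rw [ih hsort' hpos' hl hd h0]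
      simp only [pvCLev, hb]
      rfl

set_option maxHeartbeats 1000000 in
theorem pv_inner_fold (edu : List (String × String)) (hl : Int) (hd : String) (h0 : 0 ≤ hl) :
    hierA.foldl
      (fun (st2 : Int × String) p =>
        if PySem.Str.isIn p.1 (PySem.Str.lower (PySem.Dict.getD (PySem.Dict.mk edu) "degree" "")) && decide (p.2 > st2.1) then
          (p.2, PySem.Dict.getD (PySem.Dict.mk edu) "degree" p.1)
        else st2) (hl, hd) =
    if pvLev edu > hl then (pvLev edu, pvDeg edu) else (hl, hd) := by
  cases hv : PySem.Dict.get? (PySem.Dict.mk edu) "degree" with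
  | none =>
    have hdef : ∀ k : String, PySem.Dict.getD (PySem.Dict.mk edu) "degree" k = k :=
      fun k => PySem.Dict.getD_of_get?_eq_none _ _ hv
    have hlev : pvLev edu = 0 := by
      simp only [pvLev, bMatches, hdef]
      decide
    have hfold : hierA.foldl
        (fun (st2 : Int × String) p =>
          if PySem.Str.isIn p.1 (PySem.Str.lower (PySem.Dict.getD (PySem.Dict.mk edu) "degree" "")) && decide (p.2 > st2.1) then
            (p.2, PySem.Dict.getD (PySem.Dict.mk edu) "degree" p.1)
          else st2) (hl, hd) = (hl, hd) := by
      rw [PySem.List.foldl_congr_mem hierA _ (fun st _ => st) (hl, hd) ?_]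
      · exact List.foldl_fixed _
      · intro acc p hp
        have : PySem.Str.isIn p.1 (PySem.Str.lower (PySem.Dict.getD (PySem.Dict.mk edu) "degree" "")) = false := by
          rw [hdef]
          revert hp; revert p; decide
        rw [this]
        simp
    rw [hfold, hlev, if_neg (by omega)]
  | some v =>
    have hAll : ∀ k : String, PySem.Dict.getD (PySem.Dict.mk edu) "degree" k = v :=
      fun k => PySem.Dict.getD_of_get?_eq_some _ _ hv
    have hdeg : pvDeg edu = v := hAll ""
    have hb : ∀ kws : List String, bMatches kws edu = kws.any (fun k => PySem.Str.isIn k (PySem.Str.lower v)) := by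
      intro kws; simp [bMatches, hAll]
    simp only [hAll]
    show (List.foldl (pvStep v) (hl, hd) hierA) = _
    rw [pv_hier_split]
    simp only [List.foldl_append, pv_tier_fold]
    have hchain := pv_chain_fold v
      [((["phd", "doctorate", "doctoral"].any fun k => PySem.Str.isIn k (PySem.Str.lower v)), 5),
       ((["master", "masters", "mba", "ms", "ma"].any fun k => PySem.Str.isIn k (PySem.Str.lower v)), 4),
       ((["bachelor", "bachelors", "bs", "ba", "be"].any fun k => PySem.Str.isIn k (PySem.Str.lower v)), 3),
       ((["associate", "associates"].any fun k => PySem.Str.isIn k (PySem.Str.lower v)), 2),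
       ((["diploma", "certificate"].any fun k => PySem.Str.isIn k (PySem.Str.lower v)), 1)]
      (by simp [List.pairwise_cons])
      (by intro p hp; simp at hp; rcases hp with rfl | rfl | rfl | rfl | rfl <;> norm_num)
      hl hd h0
    have hlev : pvLev edu = pvCLev
      [((["phd", "doctorate", "doctoral"].any fun k => PySem.Str.isIn k (PySem.Str.lower v)), 5),
       ((["master", "masters", "mba", "ms", "ma"].any fun k => PySem.Str.isIn k (PySem.Str.lower v)), 4),
       ((["bachelor", "bachelors", "bs", "ba", "be"].any fun k => PySem.Str.isIn k (PySem.Str.lower v)), 3),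
       ((["associate", "associates"].any fun k => PySem.Str.isIn k (PySem.Str.lower v)), 2),
       ((["diploma", "certificate"].any fun k => PySem.Str.isIn k (PySem.Str.lower v)), 1)] := by
      simp only [pvLev, hb, pvCLev]
    rw [hlev, hdeg]
    exact hchain

theorem pv_find_congr {α : Type} (p q : α → Bool) (l : List α)
    (h : ∀ x ∈ l, p x = q x) : l.find? p = l.find? q := by
  induction l with
  | nil => rfl
  | cons x xs ih =>
    have hx := h x (List.mem_cons_self ..)
    have ih' := ih (fun y hy => h y (List.mem_cons_of_mem _ hy))
    cases hq : q x with
    | true => simp [hx, hq]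
    | false => simp [hx, hq, ih']

-- A's outer loop computes the maximal level and the degree of the FIRST entry attaining it
theorem pv_outer_fold (xs : List (List (String × String))) :
    ∀ (hl : Int) (hd : String), 0 ≤ hl →
    xs.foldl
      (fun (st : Int × String) edu =>
        let degree := PySem.Str.lower (PySem.Dict.getD (PySem.Dict.mk edu) "degree" "")
        hierA.foldl
          (fun (st2 : Int × String) p =>
            if PySem.Str.isIn p.1 degree && decide (p.2 > st2.1) then
              (p.2, PySem.Dict.getD (PySem.Dict.mk edu) "degree" p.1)
            else st2) st) (hl, hd)
    = (pvM xs hl,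
       if pvM xs hl > hl then
         (match xs.find? (fun e => pvLev e == pvM xs hl) with
          | some e => pvDeg e
          | none => hd)
       else hd) := by
  induction xs with
  | nil =>
    intro hl hd h0
    simp [pvM]
  | cons e rest ih =>
    intro hl hd h0
    rw [List.foldl_cons]
    refine Eq.trans (congrArg (fun st => List.foldl _ st rest) (pv_inner_fold e hl hd h0)) ?_
    beta_reduce
    have hML : pvLev e ≤ pvM rest (pvLev e) := pvM_ge _ _
    by_cases hle : pvLev e > hl
    · rw [if_pos hle, ih (pvLev e) (pvDeg e) (pvLev_nonneg e)]
      have hcons : pvM (e :: rest) hl = pvM rest (pvLev e) := by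
        simp only [pvM, List.foldl_cons]
        congr 1
        omega
      rw [hcons]
      by_cases heq : pvLev e = pvM rest (pvLev e)
      · rw [if_neg (by omega), if_pos (by omega)]
        rw [List.find?_cons_of_pos (by simp [← heq])]
      · have hMgt : pvM rest (pvLev e) > pvLev e := by omega
        rw [if_pos hMgt, if_pos (by omega)]
        rw [List.find?_cons_of_neg (by simp; omega)]
        rcases pvM_exists rest (pvLev e) with h | ⟨e', he', hl'⟩
        · omega
        · have hsome : (rest.find? (fun x => pvLev x == pvM rest (pvLev e))).isSome :=
            List.find?_isSome.mpr ⟨e', he', by simp [hl']⟩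
          cases hfind : rest.find? (fun x => pvLev x == pvM rest (pvLev e)) with
          | none => rw [hfind] at hsome; simp at hsome
          | some x => rfl
    · rw [if_neg hle, ih hl hd h0]
      have hcons : pvM (e :: rest) hl = pvM rest hl := by
        simp only [pvM, List.foldl_cons]
        congr 1
        omega
      rw [hcons]
      by_cases hM : pvM rest hl > hl
      · rw [if_pos hM, if_pos hM]
        rw [List.find?_cons_of_neg (by simp; omega)]
      · rw [if_neg hM, if_neg hM]

-- tier membership bounds the level from below, and the level names its tier
theorem pv_mt5 (edu : List (String × String))
    (h : bMatches ["phd", "doctorate", "doctoral"] edu = true) : 5 ≤ pvLev edu := by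
  unfold pvLev; split_ifs <;> omega
theorem pv_mt4 (edu : List (String × String))
    (h : bMatches ["master", "masters", "mba", "ms", "ma"] edu = true) : 4 ≤ pvLev edu := by
  unfold pvLev; split_ifs <;> omega
theorem pv_mt3 (edu : List (String × String))
    (h : bMatches ["bachelor", "bachelors", "bs", "ba", "be"] edu = true) : 3 ≤ pvLev edu := by
  unfold pvLev; split_ifs <;> omega
theorem pv_mt2 (edu : List (String × String))
    (h : bMatches ["associate", "associates"] edu = true) : 2 ≤ pvLev edu := by
  unfold pvLev; split_ifs <;> omega
theorem pv_mt1 (edu : List (String × String))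
    (h : bMatches ["diploma", "certificate"] edu = true) : 1 ≤ pvLev edu := by
  unfold pvLev; split_ifs <;> omega

theorem pv_lev5_mt (edu : List (String × String)) (h : pvLev edu = 5) :
    bMatches ["phd", "doctorate", "doctoral"] edu = true := by
  unfold pvLev at h; split_ifs at h with h5 h4 h3 h2 h1 <;> omega
theorem pv_lev4_mt (edu : List (String × String)) (h : pvLev edu = 4) :
    bMatches ["master", "masters", "mba", "ms", "ma"] edu = true := by
  unfold pvLev at h; split_ifs at h with h5 h4 h3 h2 h1 <;> omega
theorem pv_lev3_mt (edu : List (String × String)) (h : pvLev edu = 3) :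
    bMatches ["bachelor", "bachelors", "bs", "ba", "be"] edu = true := by
  unfold pvLev at h; split_ifs at h with h5 h4 h3 h2 h1 <;> omega
theorem pv_lev2_mt (edu : List (String × String)) (h : pvLev edu = 2) :
    bMatches ["associate", "associates"] edu = true := by
  unfold pvLev at h; split_ifs at h with h5 h4 h3 h2 h1 <;> omega
theorem pv_lev1_mt (edu : List (String × String)) (h : pvLev edu = 1) :
    bMatches ["diploma", "certificate"] edu = true := by
  unfold pvLev at h; split_ifs at h with h5 h4 h3 h2 h1 <;> omega

-- B scans tiers top-down: it returns the first entry of the top occupied tier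
theorem pv_alt_eq (education : List (List (String × String))) :
    get_highest_degree_py_alt education =
      if pvM education 0 > 0 then
        (match education.find? (fun e => pvLev e == pvM education 0) with
         | some e => pvDeg e
         | none => "No degree specified")
      else "No degree specified" := by
  have h0 : (0 : Int) ≤ pvM education 0 := pvM_ge _ _
  have h5 : pvM education 0 ≤ 5 := pvM_le5 _ _ (by omega)
  have hnone : ∀ (kws : List String) (t : Int),
      (∀ e, bMatches kws e = true → t ≤ pvLev e) →
      pvM education 0 < t →
      education.find? (fun e => bMatches kws e) = none := by
    intro kws t hmt hlt
    apply List.find?_eq_none.mpr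
    intro e he hb
    have h1 := hmt e hb
    have h2 := pvLev_le_pvM education 0 e he
    omega
  have hhit : ∀ (kws : List String) (t : Int), t = pvM education 0 →
      (∀ e, bMatches kws e = true → t ≤ pvLev e) →
      (∀ e, pvLev e = t → bMatches kws e = true) →
      education.find? (fun e => bMatches kws e) =
        education.find? (fun e => pvLev e == pvM education 0) := by
    intro kws t ht hub hlb
    apply pv_find_congr
    intro e he
    have hle := pvLev_le_pvM education 0 e he
    cases hb : bMatches kws e with
    | true =>
      have h1 := hub e hb
      symm
      simp only [beq_iff_eq]
      omega
    | false =>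
      symm
      rw [Bool.eq_false_iff]
      intro hEq
      rw [beq_iff_eq] at hEq
      have := hlb e (by omega)
      rw [this] at hb
      exact Bool.true_eq_false ▸ hb
  have hex : pvM education 0 > 0 →
      ∃ x, education.find? (fun e => pvLev e == pvM education 0) = some x := by
    intro hpos
    rcases pvM_exists education 0 with h | ⟨e', he', hl'⟩
    · omega
    · have hsome : (education.find? (fun e => pvLev e == pvM education 0)).isSome :=
        List.find?_isSome.mpr ⟨e', he', by simp [hl']⟩
      exact Option.isSome_iff_exists.mp hsome
  have hcase : pvM education 0 = 0 ∨ pvM education 0 = 1 ∨ pvM education 0 = 2 ∨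
      pvM education 0 = 3 ∨ pvM education 0 = 4 ∨ pvM education 0 = 5 := by omega
  simp only [get_highest_degree_py_alt, bTiers, bGo]
  rcases hcase with h | h | h | h | h | h
  · rw [hnone _ 5 pv_mt5 (by omega), hnone _ 4 pv_mt4 (by omega),
      hnone _ 3 pv_mt3 (by omega), hnone _ 2 pv_mt2 (by omega),
      hnone _ 1 pv_mt1 (by omega), if_neg (by omega)]
  · obtain ⟨x, hx⟩ := hex (by omega)
    rw [hnone _ 5 pv_mt5 (by omega), hnone _ 4 pv_mt4 (by omega),
      hnone _ 3 pv_mt3 (by omega), hnone _ 2 pv_mt2 (by omega),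
      hhit _ 1 (by omega) pv_mt1 (fun e hle => pv_lev1_mt e (by omega)), hx, if_pos (by omega)]
    rfl
  · obtain ⟨x, hx⟩ := hex (by omega)
    rw [hnone _ 5 pv_mt5 (by omega), hnone _ 4 pv_mt4 (by omega),
      hnone _ 3 pv_mt3 (by omega),
      hhit _ 2 (by omega) pv_mt2 (fun e hle => pv_lev2_mt e (by omega)), hx, if_pos (by omega)]
    rfl
  · obtain ⟨x, hx⟩ := hex (by omega)
    rw [hnone _ 5 pv_mt5 (by omega), hnone _ 4 pv_mt4 (by omega),
      hhit _ 3 (by omega) pv_mt3 (fun e hle => pv_lev3_mt e (by omega)), hx, if_pos (by omega)]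
    rfl
  · obtain ⟨x, hx⟩ := hex (by omega)
    rw [hnone _ 5 pv_mt5 (by omega),
      hhit _ 4 (by omega) pv_mt4 (fun e hle => pv_lev4_mt e (by omega)), hx, if_pos (by omega)]
    rfl
  · obtain ⟨x, hx⟩ := hex (by omega)
    rw [hhit _ 5 (by omega) pv_mt5 (fun e hle => pv_lev5_mt e (by omega)), hx, if_pos (by omega)]
    rfl

-- ===== VERDICT (by name: the statement is the Claim_ definition above) =====
theorem get_highest_degree_py_spec : Claim_equal_get_highest_degree_py := by
  intro education _
  unfold Spec_get_highest_degree_py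
  rw [pv_alt_eq]
  unfold get_highest_degree_py
  rw [pv_outer_fold education 0 "No degree specified" le_rfl]
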